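-- pv_equiv track=rewrite | github.com/Belladonna03/data_collection_analysis_pipeline | pipeline/state.py | _resolve_pipeline_status
-- ===== SOURCE A (Python) =====
-- from typing import Any, Dict, List, Literal, Optional
--
-- PipelineStatus = Literal["idle", "running", "awaiting_review", "completed", "failed"]
--
-- def _resolve_pipeline_status(statuses: List[str]) -> PipelineStatus:
--     if any(status == "failed" for status in statuses):
--         return "failed"
--     if any(status == "awaiting_review" for status in statuses):
--         return "awaiting_review"
--     if all(status in {"completed", "skipped"} for status in statuses):
--         return "completed"
--     if any(status == "running" for status in statuses):
--         return "running"
--     return "idle"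
-- ===== SOURCE B (Python) =====
-- from typing import List
--
-- def _resolve_pipeline_status(statuses: List[str]) -> str:
--     has_failed = has_awaiting = has_running = False
--     all_ok = True
--     for status in statuses:
--         if status == "failed":
--             has_failed = True
--         elif status == "awaiting_review":
--             has_awaiting = True
--         elif status == "running":
--             has_running = True
--         if status not in ("completed", "skipped"):
--             all_ok = False
--     if has_failed:
--         return "failed"
--     if has_awaiting:
--         return "awaiting_review"
--     if all_ok:
--         return "completed"
--     if has_running:
--         return "running"
--     return "idle"
-- ===== Notes on version B (the rewrite author's own statement) =====
-- stated objective: alternative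
-- what changed: Replaces A's four separate any/all scans over the list with a single pass that accumulates four boolean flags, then applies the priority ladder once to the flags.
import Mathlib
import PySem

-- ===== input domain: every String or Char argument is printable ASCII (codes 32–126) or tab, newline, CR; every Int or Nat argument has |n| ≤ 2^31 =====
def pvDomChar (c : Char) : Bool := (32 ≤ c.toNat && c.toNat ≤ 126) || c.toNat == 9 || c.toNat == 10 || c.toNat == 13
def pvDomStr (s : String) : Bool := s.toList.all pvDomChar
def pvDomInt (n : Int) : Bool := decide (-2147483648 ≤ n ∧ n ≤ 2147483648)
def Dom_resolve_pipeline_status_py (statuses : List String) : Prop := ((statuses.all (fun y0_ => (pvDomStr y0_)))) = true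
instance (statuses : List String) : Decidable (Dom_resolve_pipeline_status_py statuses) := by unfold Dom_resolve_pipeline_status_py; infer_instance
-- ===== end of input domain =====

-- B replaces A's four separate any/all scans with one flag-accumulating pass; same results, same cost class.


-- ===== PORT A =====
def resolve_pipeline_status_py (statuses : List String) : String :=
  if statuses.any (fun status => status == "failed") then "failed"
  else if statuses.any (fun status => status == "awaiting_review") then "awaiting_review"
  else if statuses.all (fun status => status == "completed" || status == "skipped") then "completed"
  else if statuses.any (fun status => status == "running") then "running"
  else "idle"

-- ===== PORT B =====
-- one pass: (has_failed, has_awaiting, has_running, all_ok)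
def pvStepB (st : Bool × Bool × Bool × Bool) (status : String) : Bool × Bool × Bool × Bool :=
  let st1 :=
    if status == "failed" then (true, st.2.1, st.2.2.1, st.2.2.2)
    else if status == "awaiting_review" then (st.1, true, st.2.2.1, st.2.2.2)
    else if status == "running" then (st.1, st.2.1, true, st.2.2.2)
    else st
  if !(status == "completed" || status == "skipped") then (st1.1, st1.2.1, st1.2.2.1, false) else st1

def resolve_pipeline_status_py_alt (statuses : List String) : String :=
  let fl := statuses.foldl pvStepB (false, false, false, true)
  if fl.1 then "failed"
  else if fl.2.1 then "awaiting_review"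
  else if fl.2.2.2 then "completed"
  else if fl.2.2.1 then "running"
  else "idle"

-- ===== PRECONDITION & SPEC =====
def Spec_resolve_pipeline_status_py (statuses : List String) (out : String) : Prop := out = resolve_pipeline_status_py_alt statuses
instance (statuses : List String) (out : String) : Decidable (Spec_resolve_pipeline_status_py statuses out) := by unfold Spec_resolve_pipeline_status_py; infer_instance

-- ===== CLAIM (what is proved, stated in full; the proofs are below) =====
def Claim_equal_resolve_pipeline_status_py : Prop := ∀ (statuses : List String), Dom_resolve_pipeline_status_py statuses → Spec_resolve_pipeline_status_py statuses (resolve_pipeline_status_py statuses)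

-- ===== LEMMAS AND PROOFS =====

-- the folded flags are exactly A's four scans
theorem pvFlags_eq (l : List String) (a b c d : Bool) :
    l.foldl pvStepB (a, b, c, d) =
      (a || l.any (fun s => s == "failed"),
       b || l.any (fun s => s == "awaiting_review"),
       c || l.any (fun s => s == "running"),
       d && l.all (fun s => s == "completed" || s == "skipped")) := by
  induction l generalizing a b c d with
  | nil => simp
  | cons x xs ih =>
    simp only [List.foldl_cons, List.any_cons, List.all_cons, pvStepB]
    by_cases hf : x == "failed" <;> by_cases ha : x == "awaiting_review" <;>
      by_cases hr : x == "running" <;> by_cases hc : (x == "completed" || x == "skipped") <;>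
      simp [hf, ha, hr, hc, ih] <;> simp_all

-- ===== VERDICT (by name: the statement is the Claim_ definition above) =====
theorem resolve_pipeline_status_py_spec : Claim_equal_resolve_pipeline_status_py := by
  intro statuses _
  unfold Spec_resolve_pipeline_status_py resolve_pipeline_status_py resolve_pipeline_status_py_alt
  simp only [pvFlags_eq, Bool.false_or, Bool.true_and]
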